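-- pv_equiv track=rewrite | github.com/Ngvanphong/PythonDynamo | lesson5.py | MakeForPoint
-- ===== SOURCE A (Python) =====
-- def MakeForPoint(listFirst, listNext):
--     listFirst1=[]
--     listNext0=[]
--     listResult=[]
--     for k in range(len(listFirst)):
--         newListSub1=[]
--         for k1 in range(len(listFirst[k])):
--             if k1%2==1:
--                 newListSub1.append(listFirst[k][k1])
--         listFirst1.append(newListSub1)
--     for j in range(len(listNext)):
--         newListSub2=[]
--         for j1 in range(len(listNext[j])):
--             if j1%2==0:
--                 newListSub2.append(listNext[j][j1])
--         listNext0.append(newListSub2)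
--     for m in range(len(listFirst1)-1):
--         listNear1= listNext0[m]
--         for n in range(len(listFirst1[m])-1):
--             listPoint=[listFirst1[m][n],listNear1[n],listFirst1[m+1][n],listNear1[n+1]]
--             listResult.append(listPoint)
--     return listResult
-- ===== SOURCE B (Python) =====
-- def MakeForPoint(listFirst, listNext):
--     # Fused single pass: index the original rows directly (odd positions 2n+1,
--     # even positions 2n) instead of building the filtered intermediate lists.
--     return [[listFirst[m][2 * n + 1],
--              listNext[m][2 * n],
--              listFirst[m + 1][2 * n + 1],
--              listNext[m][2 * n + 2]]
--             for m in range(len(listFirst) - 1)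
--             for n in range(len(listFirst[m]) // 2 - 1)]
-- ===== Notes on version B (the rewrite author's own statement) =====
-- stated objective: simpler
-- what changed: B drops the three preparatory passes that build the odd-filtered and even-filtered intermediate lists and emits each quadruple in one fused comprehension by direct index arithmetic (2n+1 / 2n) on the original rows.
import Mathlib
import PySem

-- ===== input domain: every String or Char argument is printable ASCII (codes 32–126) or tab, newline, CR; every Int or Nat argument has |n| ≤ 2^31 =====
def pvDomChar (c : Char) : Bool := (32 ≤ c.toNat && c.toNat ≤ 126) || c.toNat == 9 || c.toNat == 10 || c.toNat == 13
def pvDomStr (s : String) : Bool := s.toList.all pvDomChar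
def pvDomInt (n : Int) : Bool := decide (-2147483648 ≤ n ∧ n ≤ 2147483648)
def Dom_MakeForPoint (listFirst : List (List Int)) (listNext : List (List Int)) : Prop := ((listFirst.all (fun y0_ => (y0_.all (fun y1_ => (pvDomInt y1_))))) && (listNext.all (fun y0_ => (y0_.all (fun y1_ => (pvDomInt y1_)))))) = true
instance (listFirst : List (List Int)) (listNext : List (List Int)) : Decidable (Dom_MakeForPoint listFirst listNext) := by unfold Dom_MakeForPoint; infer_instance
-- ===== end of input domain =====

-- B replaces A's three passes (two filtered intermediate lists, then the emit
-- loop) by one fused comprehension indexing the original rows directly; simpler.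

-- ===== PORT A =====
-- inner loop 'for k1 in range(len(row)): if k1%2==1: newListSub1.append(row[k1])'
def pvOddRow (row : List Int) : List Int :=
  (List.range row.length).foldl
    (fun acc k1 => if k1 % 2 == 1 then acc ++ [row.getD k1 0] else acc) []

-- inner loop 'for j1 in range(len(row)): if j1%2==0: newListSub2.append(row[j1])'
def pvEvenRow (row : List Int) : List Int :=
  (List.range row.length).foldl
    (fun acc j1 => if j1 % 2 == 0 then acc ++ [row.getD j1 0] else acc) []

def MakeForPoint (listFirst : List (List Int)) (listNext : List (List Int)) : List (List Int) :=
  let listFirst1 := (List.range listFirst.length).foldl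
    (fun acc k => acc ++ [pvOddRow (listFirst.getD k [])]) []
  let listNext0 := (List.range listNext.length).foldl
    (fun acc j => acc ++ [pvEvenRow (listNext.getD j [])]) []
  (List.range (listFirst1.length - 1)).foldl (fun listResult m =>
    let listNear1 := listNext0.getD m []
    (List.range ((listFirst1.getD m []).length - 1)).foldl (fun res n =>
      res ++ [[(listFirst1.getD m []).getD n 0, listNear1.getD n 0,
               (listFirst1.getD (m+1) []).getD n 0, listNear1.getD (n+1) 0]]) listResult) []

-- ===== PORT B =====
def MakeForPoint_alt (listFirst : List (List Int)) (listNext : List (List Int)) : List (List Int) :=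
  (List.range (listFirst.length - 1)).flatMap (fun m =>
    (List.range ((listFirst.getD m []).length / 2 - 1)).map (fun n =>
      [(listFirst.getD m []).getD (2*n+1) 0,
       (listNext.getD m []).getD (2*n) 0,
       (listFirst.getD (m+1) []).getD (2*n+1) 0,
       (listNext.getD m []).getD (2*n+2) 0]))

-- ===== PRECONDITION & SPEC =====
-- Pre_ excludes exactly the inputs on which Python A raises IndexError: a row of
-- listNext missing, or a row too short for an index the emit loop reads.
def Pre_MakeForPoint (listFirst : List (List Int)) (listNext : List (List Int)) : Prop :=
  ∀ m < listFirst.length - 1, m < listNext.length ∧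
    ∀ n < (listFirst.getD m []).length / 2 - 1,
      2*n+1 < (listFirst.getD (m+1) []).length ∧ 2*n+2 < (listNext.getD m []).length
instance (listFirst : List (List Int)) (listNext : List (List Int)) : Decidable (Pre_MakeForPoint listFirst listNext) := by unfold Pre_MakeForPoint; infer_instance
def pvWitness_MakeForPoint : List (List Int) × List (List Int) :=
  ([[1, 2, 3, 4], [5, 6, 7, 8]], [[9, 10, 11]])
def Spec_MakeForPoint (listFirst : List (List Int)) (listNext : List (List Int)) (out : List (List Int)) : Prop := out = MakeForPoint_alt listFirst listNext
instance (listFirst : List (List Int)) (listNext : List (List Int)) (out : List (List Int)) : Decidable (Spec_MakeForPoint listFirst listNext out) := by unfold Spec_MakeForPoint; infer_instance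

-- ===== CLAIM (what is proved, stated in full; the proofs are below) =====
def Claim_equal_MakeForPoint : Prop := ∀ (listFirst : List (List Int)) (listNext : List (List Int)), Dom_MakeForPoint listFirst listNext → Pre_MakeForPoint listFirst listNext → Spec_MakeForPoint listFirst listNext (MakeForPoint listFirst listNext)

-- ===== LEMMAS AND PROOFS =====

theorem pvFilterRangeOdd (L : ℕ) :
    (List.range L).filter (fun k => k % 2 == 1) = (List.range (L / 2)).map (fun j => 2*j+1) := by
  induction L with
  | zero => rfl
  | succ L ih =>
    rw [List.range_succ, List.filter_append, ih]
    rcases Nat.even_or_odd L with h | h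
    · obtain ⟨c, hc⟩ := h
      have h1 : L % 2 = 0 := by omega
      have h2 : (L + 1) / 2 = L / 2 := by omega
      simp [h1, h2]
    · obtain ⟨c, hc⟩ := h
      have h1 : L % 2 = 1 := by omega
      have h2 : (L + 1) / 2 = L / 2 + 1 := by omega
      simp [h1, h2, List.range_succ]
      omega

theorem pvFilterRangeEven (L : ℕ) :
    (List.range L).filter (fun k => k % 2 == 0) = (List.range ((L+1) / 2)).map (fun j => 2*j) := by
  induction L with
  | zero => rfl
  | succ L ih =>
    rw [List.range_succ, List.filter_append, ih]
    rcases Nat.even_or_odd L with h | h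
    · obtain ⟨c, hc⟩ := h
      have h1 : L % 2 = 0 := by omega
      have h2 : (L + 2) / 2 = (L + 1) / 2 + 1 := by omega
      simp [h1, h2, List.range_succ]
      omega
    · obtain ⟨c, hc⟩ := h
      have h1 : L % 2 = 1 := by omega
      have h2 : (L + 2) / 2 = (L + 1) / 2 := by omega
      simp [h1, h2]

theorem pvOddRow_eq (row : List Int) :
    pvOddRow row = (List.range (row.length / 2)).map (fun j => row.getD (2*j+1) 0) := by
  unfold pvOddRow
  rw [PySem.List.foldl_append_if (p := fun k => k % 2 == 1) (f := fun k => row.getD k 0),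
      pvFilterRangeOdd, List.map_map]
  simp [Function.comp]

theorem pvEvenRow_eq (row : List Int) :
    pvEvenRow row = (List.range ((row.length + 1) / 2)).map (fun j => row.getD (2*j) 0) := by
  unfold pvEvenRow
  rw [PySem.List.foldl_append_if (p := fun k => k % 2 == 0) (f := fun k => row.getD k 0),
      pvFilterRangeEven, List.map_map]
  simp [Function.comp]

theorem pvMapGetD (xs : List (List Int)) (f : List Int → List Int) :
    (List.range xs.length).foldl (fun acc k => acc ++ [f (xs.getD k [])]) [] = xs.map f := by
  rw [PySem.List.foldl_append_singleton_eq_map]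
  simp only [List.nil_append]
  apply List.ext_getElem
  · simp
  · intro i h1 h2
    have hi : i < xs.length := by simpa using h2
    simp [List.getD_eq_getElem?_getD, List.getElem?_eq_getElem hi]

theorem pvOddRow_getD (row : List Int) (n : ℕ) :
    (pvOddRow row).getD n 0 = row.getD (2*n+1) 0 := by
  rw [pvOddRow_eq]
  by_cases h : n < row.length / 2
  · simp [List.getD_eq_getElem?_getD, h,
      List.getElem?_eq_getElem (l := row) (by omega : 2*n+1 < row.length)]
  · rw [List.getD_eq_default _ _ (by simpa using h),
        List.getD_eq_default _ _ (by omega : row.length ≤ 2*n+1)]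

theorem pvEvenRow_getD (row : List Int) (n : ℕ) :
    (pvEvenRow row).getD n 0 = row.getD (2*n) 0 := by
  rw [pvEvenRow_eq]
  by_cases h : n < (row.length + 1) / 2
  · simp [List.getD_eq_getElem?_getD, h,
      List.getElem?_eq_getElem (l := row) (by omega : 2*n < row.length)]
  · rw [List.getD_eq_default _ _ (by simpa using h),
        List.getD_eq_default _ _ (by omega : row.length ≤ 2*n)]

theorem pvOddRow_len (row : List Int) : (pvOddRow row).length = row.length / 2 := by
  rw [pvOddRow_eq]; simp

theorem pvMapRows_getD (xs : List (List Int)) (f : List Int → List Int) (m : ℕ)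
    (hm : m < xs.length) : (xs.map f).getD m [] = f (xs.getD m []) := by
  simp [List.getD_eq_getElem?_getD, hm]

theorem pvNext_getD (lN : List (List Int)) (m n : ℕ) :
    ((lN.map pvEvenRow).getD m []).getD n 0 = (lN.getD m []).getD (2*n) 0 := by
  by_cases hm : m < lN.length
  · rw [pvMapRows_getD _ _ _ hm, pvEvenRow_getD]
  · have h1 : (lN.map pvEvenRow).getD m [] = [] :=
      List.getD_eq_default _ _ (by simp; omega)
    have h2 : lN.getD m [] = [] := List.getD_eq_default _ _ (Nat.le_of_not_lt hm)
    rw [h1, h2]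
    rfl

-- ===== VERDICT (by name: the statement is the Claim_ definition above) =====
theorem MakeForPoint_spec : Claim_equal_MakeForPoint := by
  intro lF lN _ _
  show MakeForPoint lF lN = MakeForPoint_alt lF lN
  simp only [MakeForPoint, MakeForPoint_alt]
  rw [pvMapGetD lF pvOddRow, pvMapGetD lN pvEvenRow]
  have hlen : (lF.map pvOddRow).length = lF.length := by simp
  rw [hlen]
  have step1 : (List.range (lF.length - 1)).foldl (fun listResult m =>
      (List.range (((lF.map pvOddRow).getD m []).length - 1)).foldl (fun res n =>
        res ++ [[((lF.map pvOddRow).getD m []).getD n 0, ((lN.map pvEvenRow).getD m []).getD n 0,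
                 ((lF.map pvOddRow).getD (m+1) []).getD n 0, ((lN.map pvEvenRow).getD m []).getD (n+1) 0]]) listResult) [] =
    (List.range (lF.length - 1)).foldl (fun acc m =>
      acc ++ (List.range ((lF.getD m []).length / 2 - 1)).map (fun n =>
        [(lF.getD m []).getD (2*n+1) 0, (lN.getD m []).getD (2*n) 0,
         (lF.getD (m+1) []).getD (2*n+1) 0, (lN.getD m []).getD (2*n+2) 0])) [] := by
    apply PySem.List.foldl_congr_mem
    intro acc m hm
    have hm' : m < lF.length - 1 := List.mem_range.mp hm
    have hm1 : m < lF.length := by omega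
    have hm2 : m + 1 < lF.length := by omega
    rw [PySem.List.foldl_append_singleton_eq_map]
    congr 1
    rw [pvMapRows_getD _ _ _ hm1, pvMapRows_getD _ _ _ hm2, pvOddRow_len]
    apply List.map_congr_left
    intro n _
    rw [pvOddRow_getD, pvOddRow_getD, pvNext_getD, pvNext_getD]
    have h22 : 2 * (n + 1) = 2 * n + 2 := by ring
    rw [h22]
  rw [step1]
  rw [PySem.List.foldl_append_eq_flatMap]
  simp
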